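-- pv_equiv track=rewrite | github.com/sbdk-dev/knowDB | knowdb/src/knowdb/bridge/dbt_sync.py | _infer_dimension_type
-- ===== SOURCE A (Python) =====
-- from enum import Enum
--
-- class DimensionType(str, Enum):
--     """Types of dimensions."""
--     CATEGORICAL = "categorical"
--     TEMPORAL = "temporal"
--
-- def _infer_dimension_type(column_name: str) -> DimensionType:
--     """Infer dimension type from column name."""
--     # Temporal patterns
--     temporal_patterns = [
--         'date', 'time', 'timestamp', 'month', 'year', 'day', 'week',
--         'quarter', 'created', 'updated', 'signup', 'birth', 'order_date',
--         'first_', 'last_'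
--     ]
--
--     name_lower = column_name.lower()
--     for pattern in temporal_patterns:
--         if pattern in name_lower:
--             return DimensionType.TEMPORAL
--
--     return DimensionType.CATEGORICAL
-- ===== SOURCE B (Python) =====
-- from enum import Enum
--
-- class DimensionType(str, Enum):
--     """Types of dimensions."""
--     CATEGORICAL = "categorical"
--     TEMPORAL = "temporal"
--
-- # First-character dispatch table over a MINIMAL pattern set: 'timestamp' and
-- # 'order_date' are dropped because any name containing them already contains
-- # 'time' / 'date'.  Key = first letter of a pattern, value = the pattern tails.
-- _CANDS = {
--     'b': ('irth',),
--     'c': ('reated',),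
--     'd': ('ate', 'ay'),
--     'f': ('irst_',),
--     'l': ('ast_',),
--     'm': ('onth',),
--     'q': ('uarter',),
--     's': ('ignup',),
--     't': ('ime',),
--     'u': ('pdated',),
--     'w': ('eek',),
--     'y': ('ear',),
-- }
--
-- def _infer_dimension_type(column_name: str) -> DimensionType:
--     """Infer dimension type from column name (one scan, first-char dispatch)."""
--     name = column_name.lower()
--     for i, ch in enumerate(name):
--         for tail in _CANDS.get(ch, ()):
--             if name.startswith(tail, i + 1):
--                 return DimensionType.TEMPORAL
--     return DimensionType.CATEGORICAL
-- ===== Notes on version B (the rewrite author's own statement) =====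
-- stated objective: alternative
-- what changed: Replaces A's loop that tests each temporal pattern as a substring of the whole name by a single scan of the name with a first-character dispatch table over a minimal pattern set (timestamp and order_date dropped as redundant with time/date): at each position the character selects the few candidate tails to test with startswith.
import Mathlib
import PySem

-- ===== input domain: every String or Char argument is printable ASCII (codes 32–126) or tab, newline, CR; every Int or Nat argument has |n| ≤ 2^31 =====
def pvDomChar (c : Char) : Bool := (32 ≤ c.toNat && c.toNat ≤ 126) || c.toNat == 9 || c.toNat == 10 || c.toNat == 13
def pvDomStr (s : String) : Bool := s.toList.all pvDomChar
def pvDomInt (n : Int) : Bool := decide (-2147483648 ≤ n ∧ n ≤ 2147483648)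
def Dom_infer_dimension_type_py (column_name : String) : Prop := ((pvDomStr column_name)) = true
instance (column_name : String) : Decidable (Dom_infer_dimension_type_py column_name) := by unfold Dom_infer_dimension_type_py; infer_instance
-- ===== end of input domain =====

-- B replaces A's per-pattern 'pattern in name' loop by one scan of the name with a
-- first-character dispatch table over a minimal pattern set ('timestamp'/'order_date'
-- dropped as redundant); objective: alternative decomposition, same results proved equal.

-- ===== PORT A =====
-- A's temporal_patterns list, in A's order
def pvPatternsA : List (List Char) :=
  ["date".toList, "time".toList, "timestamp".toList, "month".toList, "year".toList,
   "day".toList, "week".toList, "quarter".toList, "created".toList, "updated".toList,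
   "signup".toList, "birth".toList, "order_date".toList, "first_".toList, "last_".toList]

-- A's 'for pattern in temporal_patterns: if pattern in name_lower: return TEMPORAL'
def pvLoopA : List (List Char) → List Char → String
  | [], _ => "categorical"
  | p :: ps, nl => if PySem.Chars.isIn p nl then "temporal" else pvLoopA ps nl

def infer_dimension_type_py (column_name : String) : String :=
  pvLoopA pvPatternsA (PySem.Chars.lower column_name.toList)

-- ===== PORT B =====
-- the dispatch dict _CANDS: first letter ↦ tails of the minimal patterns starting with it
def pvCands (c : Char) : List (List Char) :=
  if c = 'b' then ["irth".toList]
  else if c = 'c' then ["reated".toList]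
  else if c = 'd' then ["ate".toList, "ay".toList]
  else if c = 'f' then ["irst_".toList]
  else if c = 'l' then ["ast_".toList]
  else if c = 'm' then ["onth".toList]
  else if c = 'q' then ["uarter".toList]
  else if c = 's' then ["ignup".toList]
  else if c = 't' then ["ime".toList]
  else if c = 'u' then ["pdated".toList]
  else if c = 'w' then ["eek".toList]
  else if c = 'y' then ["ear".toList]
  else []

-- 'for i, ch in enumerate(name): for tail in _CANDS.get(ch, ()): if name.startswith(tail, i+1)'
def pvScanB : List Char → Bool
  | [] => false
  | ch :: rest => (pvCands ch).any (fun tail => tail.isPrefixOf rest) || pvScanB rest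

def infer_dimension_type_py_alt (column_name : String) : String :=
  if pvScanB (PySem.Chars.lower column_name.toList) then "temporal" else "categorical"

-- ===== PRECONDITION & SPEC =====
def Spec_infer_dimension_type_py (column_name : String) (out : String) : Prop := out = infer_dimension_type_py_alt column_name
instance (column_name : String) (out : String) : Decidable (Spec_infer_dimension_type_py column_name out) := by unfold Spec_infer_dimension_type_py; infer_instance

-- ===== CLAIM (what is proved, stated in full; the proofs are below) =====
def Claim_equal_infer_dimension_type_py : Prop := ∀ (column_name : String), Dom_infer_dimension_type_py column_name → Spec_infer_dimension_type_py column_name (infer_dimension_type_py column_name)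

-- ===== LEMMAS AND PROOFS =====

-- A's loop returns "temporal" iff some pattern is a substring of the lowered name
theorem pvLoopA_eq (ps : List (List Char)) (nl : List Char) :
    pvLoopA ps nl = if ps.any (fun p => PySem.Chars.isIn p nl) then "temporal" else "categorical" := by
  induction ps with
  | nil => rfl
  | cons p ps ih =>
    simp only [pvLoopA, List.any_cons, ih]
    by_cases h : PySem.Chars.isIn p nl <;> simp [h]

-- every dispatch entry, re-assembled, is one of A's patterns
theorem pvCands_mem {c : Char} {t : List Char} (h : t ∈ pvCands c) :
    (c :: t) ∈ pvPatternsA := by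
  unfold pvCands at h
  by_cases h1 : c = 'b'
  · rw [if_pos h1] at h; subst h1; simp only [List.mem_singleton] at h; subst h; decide
  · rw [if_neg h1] at h
    by_cases h2 : c = 'c'
    · rw [if_pos h2] at h; subst h2; simp only [List.mem_singleton] at h; subst h; decide
    · rw [if_neg h2] at h
      by_cases h3 : c = 'd'
      · rw [if_pos h3] at h; subst h3
        simp only [List.mem_cons, List.not_mem_nil, or_false] at h
        rcases h with rfl | rfl <;> decide
      · rw [if_neg h3] at h
        by_cases h4 : c = 'f'
        · rw [if_pos h4] at h; subst h4; simp only [List.mem_singleton] at h; subst h; decide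
        · rw [if_neg h4] at h
          by_cases h5 : c = 'l'
          · rw [if_pos h5] at h; subst h5; simp only [List.mem_singleton] at h; subst h; decide
          · rw [if_neg h5] at h
            by_cases h6 : c = 'm'
            · rw [if_pos h6] at h; subst h6; simp only [List.mem_singleton] at h; subst h; decide
            · rw [if_neg h6] at h
              by_cases h7 : c = 'q'
              · rw [if_pos h7] at h; subst h7; simp only [List.mem_singleton] at h; subst h; decide
              · rw [if_neg h7] at h
                by_cases h8 : c = 's'
                · rw [if_pos h8] at h; subst h8; simp only [List.mem_singleton] at h; subst h; decide
                · rw [if_neg h8] at h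
                  by_cases h9 : c = 't'
                  · rw [if_pos h9] at h; subst h9; simp only [List.mem_singleton] at h; subst h; decide
                  · rw [if_neg h9] at h
                    by_cases h10 : c = 'u'
                    · rw [if_pos h10] at h; subst h10; simp only [List.mem_singleton] at h; subst h; decide
                    · rw [if_neg h10] at h
                      by_cases h11 : c = 'w'
                      · rw [if_pos h11] at h; subst h11; simp only [List.mem_singleton] at h; subst h; decide
                      · rw [if_neg h11] at h
                        by_cases h12 : c = 'y'
                        · rw [if_pos h12] at h; subst h12; simp only [List.mem_singleton] at h; subst h; decide
                        · rw [if_neg h12] at h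
                          exact absurd h (List.not_mem_nil)

-- B's scan fires whenever some dispatched pattern occurs in the name
theorem pvScanB_of_infix {c : Char} {t cs : List Char} (h : t ∈ pvCands c)
    (hinf : (c :: t) <:+: cs) : pvScanB cs = true := by
  induction cs with
  | nil => simpa using List.eq_nil_of_infix_nil hinf
  | cons c' rest ih =>
    rcases List.infix_cons_iff.mp hinf with hpre | hinf'
    · obtain ⟨hc, ht⟩ := List.cons_prefix_cons.mp hpre
      subst hc
      simp only [pvScanB, Bool.or_eq_true, List.any_eq_true]
      exact Or.inl ⟨t, h, List.isPrefixOf_iff_prefix.mpr ht⟩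
    · simp [pvScanB, ih hinf']

-- conversely each firing of B's scan exhibits a dispatched pattern in the name
theorem infix_of_pvScanB {cs : List Char} (h : pvScanB cs = true) :
    ∃ c t, t ∈ pvCands c ∧ (c :: t) <:+: cs := by
  induction cs with
  | nil => simp [pvScanB] at h
  | cons c' rest ih =>
    simp only [pvScanB, Bool.or_eq_true] at h
    rcases h with hhit | hrest
    · simp only [List.any_eq_true] at hhit
      obtain ⟨t, ht, hpre⟩ := hhit
      exact ⟨c', t, ht, (List.cons_prefix_cons.mpr ⟨rfl, List.isPrefixOf_iff_prefix.mp hpre⟩).isInfix⟩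
    · obtain ⟨c, t, ht, hinf⟩ := ih hrest
      exact ⟨c, t, ht, List.infix_cons_iff.mpr (Or.inr hinf)⟩

-- each of A's 15 patterns contains a dispatched minimal pattern (timestamp ⊇ time, order_date ⊇ date)
theorem pvReduce {p : List Char} (hp : p ∈ pvPatternsA) :
    ∃ c t, t ∈ pvCands c ∧ (c :: t) <:+: p := by
  fin_cases hp
  · exact ⟨'d', "ate".toList, by decide, by decide⟩
  · exact ⟨'t', "ime".toList, by decide, by decide⟩
  · exact ⟨'t', "ime".toList, by decide, by decide⟩
  · exact ⟨'m', "onth".toList, by decide, by decide⟩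
  · exact ⟨'y', "ear".toList, by decide, by decide⟩
  · exact ⟨'d', "ay".toList, by decide, by decide⟩
  · exact ⟨'w', "eek".toList, by decide, by decide⟩
  · exact ⟨'q', "uarter".toList, by decide, by decide⟩
  · exact ⟨'c', "reated".toList, by decide, by decide⟩
  · exact ⟨'u', "pdated".toList, by decide, by decide⟩
  · exact ⟨'s', "ignup".toList, by decide, by decide⟩
  · exact ⟨'b', "irth".toList, by decide, by decide⟩
  · exact ⟨'d', "ate".toList, by decide, by decide⟩
  · exact ⟨'f', "irst_".toList, by decide, by decide⟩
  · exact ⟨'l', "ast_".toList, by decide, by decide⟩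

theorem pvScanB_eq_any (cs : List Char) :
    pvScanB cs = pvPatternsA.any (fun p => PySem.Chars.isIn p cs) := by
  cases hb : pvPatternsA.any (fun p => PySem.Chars.isIn p cs) with
  | true =>
    simp only [List.any_eq_true] at hb
    obtain ⟨p, hp, hIn⟩ := hb
    obtain ⟨c, t, ht, hsub⟩ := pvReduce hp
    exact pvScanB_of_infix ht (hsub.trans ((PySem.Chars.isIn_iff_infix p cs).mp hIn))
  | false =>
    cases hs : pvScanB cs with
    | false => rfl
    | true =>
      obtain ⟨c, t, ht, hinf⟩ := infix_of_pvScanB hs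
      have : pvPatternsA.any (fun p => PySem.Chars.isIn p cs) = true :=
        List.any_eq_true.mpr ⟨c :: t, pvCands_mem ht,
          (PySem.Chars.isIn_iff_infix _ cs).mpr hinf⟩
      rw [hb] at this; exact absurd this (by simp)

-- ===== VERDICT (by name: the statement is the Claim_ definition above) =====
theorem infer_dimension_type_py_spec : Claim_equal_infer_dimension_type_py := by
  intro column_name _
  unfold Spec_infer_dimension_type_py infer_dimension_type_py infer_dimension_type_py_alt
  rw [pvLoopA_eq, pvScanB_eq_any]
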